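-- pv_equiv track=rewrite | github.com/burmistrov1337/PythonVeb | Вебинар 6/1.py | get_up1
-- ===== SOURCE A (Python) =====
-- def get_up1(nums):
--     ups = [nums[0]]
--     for i in nums:
--         list02 = []
--         list02.append(min(nums))
--         for j in (i, len(nums)):
--             if i > max(ups):
--                 ups.append(i)
--
--     return ups
-- ===== SOURCE B (Python) =====
-- def get_up1(nums):
--     # phase 1: build the full prefix-maximum table
--     maxes = []
--     cur = nums[0]
--     for x in nums:
--         cur = max(cur, x)
--         maxes.append(cur)
--     # phase 2: an element is a record iff it exceeds the prefix max before it
--     ups = [nums[0]]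
--     for prev, x in zip(maxes, nums[1:]):
--         if x > prev:
--             ups.append(x)
--     return ups
-- ===== Notes on version B (the rewrite author's own statement) =====
-- stated objective: faster
-- what changed: A rescans max(ups) (and recomputes min(nums), twice per element via a redundant 2-iteration inner loop) for every element; B is a two-phase decomposition: build the prefix-maximum table once in one pass, then scan zip(maxes, nums[1:]) appending each element that exceeds the max before it.
-- outside the precondition, e.g. on get_up1([]): A raises IndexError, B raises IndexError
import Mathlib
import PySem

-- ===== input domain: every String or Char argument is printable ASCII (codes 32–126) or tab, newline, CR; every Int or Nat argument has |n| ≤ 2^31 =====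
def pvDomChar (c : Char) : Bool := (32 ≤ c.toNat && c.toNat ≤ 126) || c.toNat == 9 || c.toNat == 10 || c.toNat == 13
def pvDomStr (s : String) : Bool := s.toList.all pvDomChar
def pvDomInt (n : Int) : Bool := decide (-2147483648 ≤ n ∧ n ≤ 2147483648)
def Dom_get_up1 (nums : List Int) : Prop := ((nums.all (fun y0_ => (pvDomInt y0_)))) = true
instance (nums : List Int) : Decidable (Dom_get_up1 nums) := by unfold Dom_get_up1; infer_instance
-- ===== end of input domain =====

-- B replaces A's per-element max(ups) rescan (and dead min(nums) work) with a
-- two-phase decomposition: build the prefix-maximum table once, then scan it.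

-- ===== PORT A =====
-- loop body of A for element i: the inner `for j in (i, len(nums))` runs the
-- record test twice; each test recomputes max(ups); list02 is A's dead code
def get_up1_step (nums : List Int) (ups : List Int) (i : Int) : List Int :=
  let _list02 : List (Option Int) := [] ++ [PySem.List.min? nums (fun y => y)]
  [i, (nums.length : Int)].foldl (fun ups _j =>
    match PySem.List.max? ups (fun y => y) with
    | some m => if i > m then ups ++ [i] else ups
    | none => ups) ups

def get_up1 (nums : List Int) : List Int :=
  match PySem.List.pyGet? nums 0 with
  | none => []   -- IndexError on empty input; excluded by Pre_get_up1
  | some h => nums.foldl (get_up1_step nums) [h]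

-- ===== PORT B =====
def get_up1_alt (nums : List Int) : List Int :=
  match PySem.List.pyGet? nums 0 with
  | none => []   -- cur = nums[0] raises on empty input; excluded by Pre_get_up1
  | some h =>
    -- phase 1: prefix-maximum table (state: (maxes, cur))
    let maxes := (nums.foldl (fun (p : List Int × Int) x =>
      let c := max p.2 x; (p.1 ++ [c], c)) (([] : List Int), h)).1
    -- phase 2: zip(maxes, nums[1:]) pairs each element with the max before it
    (List.zip maxes (PySem.List.slice nums (some 1) none)).foldl
      (fun ups q => if q.2 > q.1 then ups ++ [q.2] else ups) [h]

-- ===== PRECONDITION & SPEC =====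
-- Pre_ excludes only the empty list, on which both programs raise IndexError (nums[0]).
def Pre_get_up1 (nums : List Int) : Prop := nums ≠ []
instance (nums : List Int) : Decidable (Pre_get_up1 nums) := by unfold Pre_get_up1; infer_instance
def pvWitness_get_up1 : List Int := ([3, 1, 4, 1, 5])

def Spec_get_up1 (nums : List Int) (out : List Int) : Prop := out = get_up1_alt nums
instance (nums : List Int) (out : List Int) : Decidable (Spec_get_up1 nums out) := by unfold Spec_get_up1; infer_instance

-- ===== CLAIM (what is proved, stated in full; the proofs are below) =====
def Claim_equal_get_up1 : Prop := ∀ (nums : List Int), Dom_get_up1 nums → Pre_get_up1 nums → Spec_get_up1 nums (get_up1 nums)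

-- ===== LEMMAS AND PROOFS =====

-- reference function: the records of t given running maximum c so far
def pvRecords (c : Int) (t : List Int) : List Int :=
  match t with
  | [] => []
  | x :: xs => (if c < x then [x] else []) ++ pvRecords (max c x) xs

-- one step of A, on a nonempty ups with maximum m, appends i iff i is a new record
theorem pvA_step (l' : List Int) (u i : Int) (r : List Int) (m : Int) (hm : r.foldl max u = m) :
    get_up1_step l' (u :: r) i = if m < i then u :: (r ++ [i]) else u :: r := by
  have h1 : PySem.List.max? (u :: r) (fun y => y) = some m := by
    rw [PySem.List.max?_id_cons, hm]
  unfold get_up1_step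
  simp only [List.foldl_cons, List.foldl_nil, h1]
  by_cases hi : m < i
  · simp [hi, PySem.List.max?_id_cons, List.foldl_append, hm,
          max_eq_right (le_of_lt hi)]
  · simp [hi, h1]

-- A's outer fold, started from any nonempty ups whose maximum is m, appends exactly the records
theorem pvA_fold (l' : List Int) (l : List Int) :
    ∀ (u : Int) (r : List Int) (m : Int), (r.foldl max u) = m →
    l.foldl (get_up1_step l') (u :: r) = (u :: r) ++ pvRecords m l := by
  induction l with
  | nil => intro u r m _; simp [pvRecords]
  | cons x xs ih =>
    intro u r m hm
    rw [List.foldl_cons, pvA_step l' u x r m hm]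
    by_cases hx : m < x
    · rw [if_pos hx, ih u (r ++ [x]) (max m x) (by rw [List.foldl_append, hm]; simp)]
      simp [pvRecords, hx, max_eq_right (le_of_lt hx)]
    · rw [if_neg hx, ih u r (max m x) (by rw [hm]; omega)]
      simp [pvRecords, hx, max_eq_left (not_lt.mp hx)]

-- the prefix-maximum table as a function
def pvPm (c : Int) (t : List Int) : List Int :=
  match t with
  | [] => []
  | x :: xs => (max c x) :: pvPm (max c x) xs

-- B's phase-1 fold computes the prefix-maximum table
theorem pvB_phase1 (l : List Int) : ∀ (acc : List Int) (c : Int),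
    l.foldl (fun (p : List Int × Int) x =>
      let c := max p.2 x; (p.1 ++ [c], c)) (acc, c)
    = (acc ++ pvPm c l, l.foldl max c) := by
  induction l with
  | nil => intro acc c; simp [pvPm]
  | cons x xs ih =>
    intro acc c
    simp only [List.foldl_cons, pvPm]
    rw [ih]
    simp

-- B's phase-2 fold over zip(maxes, tail) appends exactly the records
theorem pvB_phase2 (l : List Int) : ∀ (c : Int) (acc : List Int),
    (List.zip (c :: pvPm c l) l).foldl
      (fun ups q => if q.2 > q.1 then ups ++ [q.2] else ups) acc
    = acc ++ pvRecords c l := by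
  induction l with
  | nil => intro c acc; simp [pvRecords]
  | cons x xs ih =>
    intro c acc
    simp only [pvPm, pvRecords, List.zip_cons_cons, List.foldl_cons]
    by_cases hx : c < x
    · rw [if_pos hx, ih (max c x) (acc ++ [x])]
      simp [hx]
    · rw [if_neg hx, ih (max c x) acc]
      simp [hx]

-- ===== VERDICT (by name: the statement is the Claim_ definition above) =====
theorem get_up1_spec : Claim_equal_get_up1 := by
  intro nums _ hpre
  unfold Spec_get_up1 get_up1 get_up1_alt
  obtain ⟨h, t, rfl⟩ : ∃ h t, nums = h :: t := by
    cases nums with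
    | nil => exact absurd rfl hpre
    | cons h t => exact ⟨h, t, rfl⟩
  have hget : PySem.List.pyGet? (h :: t) (0 : Int) = some h := by
    simp [PySem.List.pyGet?, PySem.List.pyIdx?]
  simp only [hget]
  rw [pvA_fold (h :: t) (h :: t) h [] h rfl]
  rw [pvB_phase1 (h :: t) [] h]
  rw [PySem.List.slice_from_one]
  simp only [List.nil_append, List.tail_cons]
  have hpm : pvPm h (h :: t) = h :: pvPm h t := by simp [pvPm]
  rw [hpm, pvB_phase2 t h [h]]
  simp [pvRecords]
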